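-- pv_equiv track=rewrite | github.com/theonewolf/aoc2024 | 22/22.py | compute_secret_hash
-- ===== SOURCE A (Python) =====
-- from math import floor
--
-- def compute_secret_hash(secret, iterations):
--     for _ in range(iterations):
--         result = secret * 64
--         secret ^= result
--         secret %= 16777216
--
--         result = secret / 32
--         result = floor(result)
--         secret ^= result
--         secret %= 16777216
--
--         result = secret * 2048
--         secret ^= result
--         secret %= 16777216
--
--     return secret
-- ===== SOURCE B (Python) =====
-- def compute_secret_hash(secret, iterations):
--     # The per-round update is a GF(2)-linear map on 24-bit states: apply it
--     # via binary exponentiation of its 24-column bit-matrix representation.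
--     if iterations <= 0:
--         return secret
--     MOD = 16777216
--
--     def step(s):
--         s = (s ^ (s * 64)) % MOD
--         s = (s ^ (s // 32)) % MOD
--         s = (s ^ (s * 2048)) % MOD
--         return s
--
--     def apply(mat, v):
--         r = 0
--         for j in range(24):
--             if (v // (2 ** j)) % 2 == 1:
--                 r ^= mat[j]
--         return r
--
--     base = [step(2 ** j) for j in range(24)]
--     s = secret % MOD
--     n = iterations
--     while n > 0:
--         if n % 2 == 1:
--             s = apply(base, s)
--         n //= 2
--         if n > 0:
--             base = [apply(base, c) for c in base]
--     return s
-- ===== Notes on version B (the rewrite author's own statement) =====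
-- stated objective: faster
-- what changed: A runs the xor-shift-mod round once per iteration; B recognises the round as a GF(2)-linear map on 24-bit states, represents it as 24 column bit-masks and applies it by binary exponentiation (repeated matrix squaring), doing O(log iterations) squarings instead of O(iterations) rounds.
import Mathlib
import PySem

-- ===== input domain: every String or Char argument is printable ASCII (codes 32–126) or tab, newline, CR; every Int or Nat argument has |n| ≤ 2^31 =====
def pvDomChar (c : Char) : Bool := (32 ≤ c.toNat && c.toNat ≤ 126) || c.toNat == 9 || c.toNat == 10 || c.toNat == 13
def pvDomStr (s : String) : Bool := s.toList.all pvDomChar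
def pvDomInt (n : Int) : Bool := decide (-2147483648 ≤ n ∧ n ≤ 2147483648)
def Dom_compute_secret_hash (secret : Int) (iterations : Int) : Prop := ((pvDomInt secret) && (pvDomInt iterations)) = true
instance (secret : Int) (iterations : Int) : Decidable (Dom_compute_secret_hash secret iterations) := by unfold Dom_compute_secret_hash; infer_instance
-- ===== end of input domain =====

-- B replaces A's per-round loop by binary exponentiation of the round's GF(2)-linear
-- bit-matrix (24 column masks): O(log iterations) squarings instead of O(iterations) rounds.

-- ===== PORT A =====
-- literal transliteration of A's loop; `floor(secret/32)` is ported as `// 32`, exact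
-- because at that point 0 ≤ secret < 2^24 so the float quotient is exact.
def compute_secret_hash (secret : Int) (iterations : Int) : Int :=
  (PySem.List.pyRange 0 iterations 1).foldl
    (fun s _ =>
      let s1 := PySem.Int.mod (PySem.Int.bxor s (s * 64)) 16777216
      let s2 := PySem.Int.mod (PySem.Int.bxor s1 (PySem.Int.floordiv s1 32)) 16777216
      PySem.Int.mod (PySem.Int.bxor s2 (s2 * 2048)) 16777216)
    secret

-- ===== PORT B =====
-- Source B's `step` helper (one round of the update)
def pvStep (s : Int) : Int :=
  let s1 := PySem.Int.mod (PySem.Int.bxor s (s * 64)) 16777216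
  let s2 := PySem.Int.mod (PySem.Int.bxor s1 (PySem.Int.floordiv s1 32)) 16777216
  PySem.Int.mod (PySem.Int.bxor s2 (s2 * 2048)) 16777216

-- Source B's `apply`: XOR together the masks at the set bit positions of v
def pvApply (mat : List Int) (v : Int) : Int :=
  (List.range 24).foldl
    (fun (r : Int) (j : Nat) =>
      if PySem.Int.mod (PySem.Int.floordiv v ((2 : Int) ^ j)) 2 = 1 then
        PySem.Int.bxor r (PySem.List.pyGetD mat (j : Int) 0)
      else r)
    0

-- Source B's `while n > 0` loop: apply the current power on odd bits, then square
def pvPowLoop (base : List Int) (s : Int) (n : Int) : Int :=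
  if n ≤ 0 then s
  else
    let s' := if PySem.Int.mod n 2 = 1 then pvApply base s else s
    let n' := PySem.Int.floordiv n 2
    if n' ≤ 0 then s' else pvPowLoop (base.map (fun c => pvApply base c)) s' n'
termination_by n.toNat
decreasing_by
  rw [PySem.Int.floordiv_eq_ediv_of_pos (by norm_num)] at *
  omega

def compute_secret_hash_alt (secret : Int) (iterations : Int) : Int :=
  if iterations ≤ 0 then secret
  else
    pvPowLoop ((List.range 24).map (fun j => pvStep ((2 : Int) ^ j)))
      (PySem.Int.mod secret 16777216) iterations

-- ===== PRECONDITION & SPEC =====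
def Spec_compute_secret_hash (secret : Int) (iterations : Int) (out : Int) : Prop := out = compute_secret_hash_alt secret iterations
instance (secret : Int) (iterations : Int) (out : Int) : Decidable (Spec_compute_secret_hash secret iterations out) := by unfold Spec_compute_secret_hash; infer_instance

-- ===== CLAIM (what is proved, stated in full; the proofs are below) =====
def Claim_equal_compute_secret_hash : Prop := ∀ (secret : Int) (iterations : Int), Dom_compute_secret_hash secret iterations → Spec_compute_secret_hash secret iterations (compute_secret_hash secret iterations)

-- ===== LEMMAS AND PROOFS =====

-- Nat-level model of one round
def NatStep (n : Nat) : Nat :=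
  let a := (n ^^^ (n <<< 6)) % 2 ^ 24
  let b := (a ^^^ (a >>> 5)) % 2 ^ 24
  (b ^^^ (b <<< 11)) % 2 ^ 24

-- matrix of NatStep^[K]: column j is the image of bit j
def matOf (K : Nat) : List Int :=
  (List.range 24).map (fun j => ((NatStep^[K] (2 ^ j) : Nat) : Int))

lemma foldl_const_iterate {α β : Type} (f : α → α) (l : List β) (x : α) :
    l.foldl (fun s _ => f s) x = f^[l.length] x := by
  induction l generalizing x with
  | nil => rfl
  | cons a l ih => simp [List.foldl_cons, ih, Function.iterate_succ_apply]

lemma length_pyRange01 (n : Int) : (PySem.List.pyRange 0 n 1).length = n.toNat := by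
  simp only [PySem.List.pyRange]
  split_ifs with h1 h2 h3 <;> simp_all
  all_goals omega


lemma mod_cast_M (n : Nat) : PySem.Int.mod (n : Int) 16777216 = ((n % 2 ^ 24 : Nat) : Int) := by
  rw [PySem.Int.mod_eq_emod_of_pos (by norm_num)]; push_cast; norm_num

lemma testBit_shl_add (a b k : Nat) (h : b < 2 ^ k) (i : Nat) :
    (a <<< k + b).testBit i = ((a <<< k).testBit i ^^ b.testBit i) := by
  rcases lt_or_ge i k with hik | hik
  · have hsl : (a <<< k).testBit i = false := by
      simp [Nat.testBit_shiftLeft, Nat.not_le.mpr hik]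
    rw [hsl, Nat.shiftLeft_eq, Nat.testBit_eq_decide_div_mod_eq]
    have hdiv : (a * 2 ^ k + b) / 2 ^ i = a * 2 ^ (k - i) + b / 2 ^ i := by
      have h1 : 2 ^ i * (a * 2 ^ (k - i)) = a * 2 ^ k := by
        rw [← mul_assoc, mul_comm ((2:Nat) ^ i) a, mul_assoc, ← pow_add,
          show i + (k - i) = k by omega]
      rw [← h1, Nat.mul_add_div (by positivity)]
    have heven : a * 2 ^ (k - i) % 2 = 0 := by
      rw [show k - i = (k - i - 1) + 1 by omega, pow_succ, ← mul_assoc]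
      exact Nat.mul_mod_left _ 2
    rw [hdiv, Nat.testBit_eq_decide_div_mod_eq]
    simp [Nat.add_mod, heven]
  · have hb : b.testBit i = false :=
      Nat.testBit_lt_two_pow (lt_of_lt_of_le h (Nat.pow_le_pow_right (by norm_num) hik))
    rw [hb, Bool.xor_false, Nat.testBit_eq_decide_div_mod_eq, Nat.testBit_eq_decide_div_mod_eq]
    have key : ∀ c : Nat, c < 2 ^ k → (a <<< k + c) / 2 ^ i = a / 2 ^ (i - k) := by
      intro c hc
      rw [Nat.shiftLeft_eq]
      rw [show (2:Nat) ^ i = 2 ^ k * 2 ^ (i - k) by rw [← pow_add]; congr 1; omega]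
      rw [← Nat.div_div_eq_div_mul]
      rw [show a * 2 ^ k + c = 2 ^ k * a + c by ring]
      rw [Nat.mul_add_div (by positivity), Nat.div_eq_of_lt hc, Nat.add_zero]
    have k2 := key 0 (by positivity)
    rw [key b h, Nat.add_zero] at *
    rw [k2]

lemma shl_add_eq_xor (a b k : Nat) (h : b < 2 ^ k) : a <<< k + b = (a <<< k) ^^^ b :=
  Nat.eq_of_testBit_eq fun i => by
    rw [testBit_shl_add a b k h i, Nat.testBit_xor]

lemma testBit_sub_mask (w n i : Nat) (h : n < 2 ^ w) :
    (2 ^ w - 1 - n).testBit i = (decide (i < w) && !(n.testBit i)) := by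
  have h1 : (2 ^ w - 1 - n) = (~~~ (BitVec.ofNat w n)).toNat := by
    rw [BitVec.toNat_not, BitVec.toNat_ofNat, Nat.mod_eq_of_lt h]
  rw [h1, BitVec.testBit_toNat, BitVec.getLsbD_not, BitVec.getLsbD_ofNat]
  by_cases hi : i < w <;> simp [hi]

lemma lin_shl (k a b : Nat) :
    ((a ^^^ b) ^^^ ((a ^^^ b) <<< k)) % 2 ^ 24
      = ((a ^^^ a <<< k) % 2 ^ 24) ^^^ ((b ^^^ b <<< k) % 2 ^ 24) := by
  apply Nat.eq_of_testBit_eq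
  intro i
  simp only [Nat.testBit_mod_two_pow, Nat.testBit_xor, Nat.testBit_shiftLeft, ge_iff_le]
  by_cases h24 : i < 24 <;> by_cases hk : k ≤ i <;>
    simp [h24, hk, Bool.xor_left_comm]

lemma lin_shr (k a b : Nat) :
    ((a ^^^ b) ^^^ ((a ^^^ b) >>> k)) % 2 ^ 24
      = ((a ^^^ a >>> k) % 2 ^ 24) ^^^ ((b ^^^ b >>> k) % 2 ^ 24) := by
  apply Nat.eq_of_testBit_eq
  intro i
  simp only [Nat.testBit_mod_two_pow, Nat.testBit_xor, Nat.testBit_shiftRight]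
  by_cases h24 : i < 24 <;>
    simp [h24, Bool.xor_left_comm]

lemma NatStep_xor (a b : Nat) : NatStep (a ^^^ b) = NatStep a ^^^ NatStep b := by
  simp only [NatStep]
  rw [lin_shl 6, lin_shr 5, lin_shl 11]

lemma NatStep_lt (n : Nat) : NatStep n < 2 ^ 24 := by
  simp only [NatStep]
  exact Nat.mod_lt _ (by norm_num)

lemma iter_lt (k n : Nat) (h : n < 2 ^ 24) : NatStep^[k] n < 2 ^ 24 := by
  cases k with
  | zero => exact h
  | succ k => rw [Function.iterate_succ_apply']; exact NatStep_lt _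

lemma iter_xor (k a b : Nat) : NatStep^[k] (a ^^^ b) = NatStep^[k] a ^^^ NatStep^[k] b := by
  induction k generalizing a b with
  | zero => rfl
  | succ k ih => simp only [Function.iterate_succ_apply', ih, NatStep_xor]

lemma iter_zero (k : Nat) : NatStep^[k] 0 = 0 := by
  induction k with
  | zero => rfl
  | succ k ih => rw [Function.iterate_succ_apply', ih]; rfl

lemma nonneg_id (m : Nat) :
    (m ^^^ m <<< 6) % 2 ^ 24 = ((m % 2 ^ 24) ^^^ (m % 2 ^ 24) <<< 6) % 2 ^ 24 := by
  apply Nat.eq_of_testBit_eq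
  intro i
  simp only [Nat.testBit_mod_two_pow, Nat.testBit_xor, Nat.testBit_shiftLeft, ge_iff_le]
  by_cases h24 : i < 24 <;> by_cases h6 : 6 ≤ i <;>
    simp [h24, h6, show 6 ≤ i → i < 24 → i - 6 < 24 from by omega]

lemma neg_id (m : Nat) :
    (m ^^^ (64 * m + 63)) % 2 ^ 24
      = ((2 ^ 24 - 1 - m % 2 ^ 24) ^^^ (2 ^ 24 - 1 - m % 2 ^ 24) <<< 6) % 2 ^ 24 := by
  have h63 : 64 * m + 63 = (m <<< 6) ^^^ 63 := by
    rw [← shl_add_eq_xor m 63 6 (by norm_num), Nat.shiftLeft_eq]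
    ring
  rw [h63]
  apply Nat.eq_of_testBit_eq
  intro i
  simp only [Nat.testBit_mod_two_pow, Nat.testBit_xor, Nat.testBit_shiftLeft, ge_iff_le,
    testBit_sub_mask 24 (m % 2 ^ 24) _ (Nat.mod_lt _ (by norm_num)),
    show (63 : Nat) = 2 ^ 6 - 1 by norm_num, Nat.testBit_two_pow_sub_one]
  by_cases h24 : i < 24 <;> by_cases h6 : 6 ≤ i <;>
    simp [h24, h6, show 6 ≤ i → i < 24 → i - 6 < 24 from by omega,
      show 6 ≤ i → ¬ i < 6 from by omega, show ¬ 6 ≤ i → i < 6 from by omega,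
      Bool.xor_comm]

lemma op1_eq (x : Int) :
    PySem.Int.mod (PySem.Int.bxor x (x * 64)) 16777216
      = ((((PySem.Int.mod x 16777216).toNat ^^^ (PySem.Int.mod x 16777216).toNat <<< 6) % 2 ^ 24 : Nat) : Int) := by
  rcases lt_or_ge x 0 with hneg | hx
  case inr =>
    obtain ⟨m, rfl⟩ : ∃ m : Nat, x = (m : Int) := ⟨x.toNat, (Int.toNat_of_nonneg hx).symm⟩
    have h1 : ((m : Int) * 64) = ((m * 64 : Nat) : Int) := by push_cast; ring
    rw [h1, PySem.Int.bxor_natCast, mod_cast_M, mod_cast_M, Int.toNat_natCast]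
    rw [show m * 64 = m <<< 6 by simp [Nat.shiftLeft_eq]]
    rw [nonneg_id]
  case inl =>
    set m : Nat := (-x - 1).toNat with hmdef
    have hxneg : ¬ (0 ≤ x) := by omega
    have hx64 : ¬ (0 ≤ x * 64) := by omega
    have hb : PySem.Int.bxor x (x * 64) = ((m ^^^ (64 * m + 63) : Nat) : Int) := by
      simp only [PySem.Int.bxor, if_neg hxneg, if_neg hx64]
      have h2 : (-(x * 64) - 1).toNat = 64 * m + 63 := by omega
      rw [h2]
    have hr : (PySem.Int.mod x 16777216).toNat = 2 ^ 24 - 1 - m % 2 ^ 24 := by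
      rw [PySem.Int.mod_eq_emod_of_pos (by norm_num)]
      have h24 : (2:Nat) ^ 24 = 16777216 := by norm_num
      rw [h24]
      omega
    rw [hb, mod_cast_M, hr, neg_id]

lemma cast_step2 (a : Nat) :
    PySem.Int.mod (PySem.Int.bxor (a : Int) (PySem.Int.floordiv (a : Int) 32)) 16777216
      = (((a ^^^ a >>> 5) % 2 ^ 24 : Nat) : Int) := by
  have h32 : PySem.Int.floordiv (a : Int) 32 = ((a >>> 5 : Nat) : Int) := by
    rw [PySem.Int.floordiv_eq_ediv_of_pos (by norm_num), Nat.shiftRight_eq_div_pow]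
    push_cast
    norm_num
  rw [h32, PySem.Int.bxor_natCast, mod_cast_M]

lemma cast_step3 (b : Nat) :
    PySem.Int.mod (PySem.Int.bxor (b : Int) ((b : Int) * 2048)) 16777216
      = (((b ^^^ b <<< 11) % 2 ^ 24 : Nat) : Int) := by
  have h2048 : ((b : Int) * 2048) = ((b * 2048 : Nat) : Int) := by push_cast; ring
  rw [h2048, PySem.Int.bxor_natCast, mod_cast_M,
    show b * 2048 = b <<< 11 by simp [Nat.shiftLeft_eq]]

lemma pvStep_eq (x : Int) :
    pvStep x = ((NatStep (PySem.Int.mod x 16777216).toNat : Nat) : Int) := by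
  simp only [pvStep]
  rw [op1_eq, cast_step2, cast_step3]
  simp only [NatStep]

lemma bit_cond (v j : Nat) :
    (PySem.Int.mod (PySem.Int.floordiv ((v : Nat) : Int) ((2 : Int) ^ j)) 2 = 1) ↔ v.testBit j = true := by
  rw [PySem.Int.floordiv_eq_ediv_of_pos (by positivity), PySem.Int.mod_eq_emod_of_pos (by norm_num)]
  rw [Nat.testBit_eq_decide_div_mod_eq]
  have h1 : ((v : Int) / (2 : Int) ^ j) = ((v / 2 ^ j : Nat) : Int) := by push_cast; ring
  rw [h1]
  have h2 : (((v / 2 ^ j : Nat) : Int) % 2) = ((v / 2 ^ j % 2 : Nat) : Int) := by push_cast; ring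
  rw [h2]
  constructor
  · intro h; simp; exact_mod_cast h
  · intro h; simp at h; exact_mod_cast h

lemma pvApply_inv (K v : Nat) : ∀ k, k ≤ 24 →
    (List.range k).foldl
      (fun (r : Int) (j : Nat) =>
        if PySem.Int.mod (PySem.Int.floordiv ((v : Nat) : Int) ((2 : Int) ^ j)) 2 = 1 then
          PySem.Int.bxor r (PySem.List.pyGetD (matOf K) (j : Int) 0)
        else r)
      0 = ((NatStep^[K] (v % 2 ^ k) : Nat) : Int) := by
  intro k
  induction k with
  | zero => intro _; simp [Nat.mod_one, iter_zero]
  | succ k ih =>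
    intro hk
    rw [List.range_succ, List.foldl_append, ih (by omega)]
    simp only [List.foldl_cons, List.foldl_nil]
    have hget : PySem.List.pyGetD (matOf K) (k : Int) 0 = ((NatStep^[K] (2 ^ k) : Nat) : Int) := by
      rw [PySem.List.pyGetD_natCast, matOf, PySem.List.getD_map_range _ _ _ _ (by omega)]
    have hdecomp : v % 2 ^ (k + 1) = (if v.testBit k = true then 2 ^ k else 0) ^^^ (v % 2 ^ k) := by
      rw [Nat.mod_pow_succ]
      by_cases hb : v.testBit k = true
      · have ht : v / 2 ^ k % 2 = 1 := by
          rw [Nat.testBit_eq_decide_div_mod_eq] at hb; simpa using hb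
        have hx := shl_add_eq_xor 1 (v % 2 ^ k) k (Nat.mod_lt v (by positivity))
        simp only [Nat.shiftLeft_eq, Nat.one_mul] at hx
        rw [ht, if_pos hb, Nat.mul_one, Nat.add_comm, hx]
      · have ht : v / 2 ^ k % 2 = 0 := by
          rw [Nat.testBit_eq_decide_div_mod_eq] at hb; simp at hb; omega
        simp [ht, hb]
    by_cases hb : v.testBit k = true
    · rw [if_pos (by rw [bit_cond]; exact hb)]
      rw [hget, PySem.Int.bxor_natCast, hdecomp, hb, if_pos rfl, iter_xor, Nat.xor_comm]
    · rw [if_neg (by rw [bit_cond]; exact hb)]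
      have hb' : v.testBit k = false := by simpa using hb
      rw [hdecomp, hb']
      simp

lemma pvApply_eq (K v : Nat) (hv : v < 2 ^ 24) :
    pvApply (matOf K) (v : Int) = ((NatStep^[K] v : Nat) : Int) := by
  have h := pvApply_inv K v 24 (le_refl _)
  rw [Nat.mod_eq_of_lt hv] at h
  exact h

lemma matOf_sq (K : Nat) :
    (matOf K).map (fun c => pvApply (matOf K) c) = matOf (2 * K) := by
  nth_rewrite 2 [matOf]
  nth_rewrite 2 [matOf]
  rw [List.map_map]
  apply List.map_congr_left
  intro j hj
  have hj' : j < 24 := List.mem_range.mp hj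
  have h2 : (2 : Nat) ^ j < 2 ^ 24 := Nat.pow_lt_pow_right (by norm_num) hj'
  simp only [Function.comp_apply]
  rw [pvApply_eq K _ (iter_lt K _ h2)]
  rw [← Function.iterate_add_apply, two_mul]

lemma pvPowLoop_eq : ∀ (N : Nat) (n : Int), 0 < n → n.toNat ≤ N → ∀ (K v : Nat), v < 2 ^ 24 →
    pvPowLoop (matOf K) (v : Int) n = ((NatStep^[K * n.toNat] v : Nat) : Int) := by
  intro N
  induction N with
  | zero => intro n hn hN; omega
  | succ N ih =>
    intro n hn hN K v hv
    rw [pvPowLoop]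
    have hmod : PySem.Int.mod n 2 = n % 2 := PySem.Int.mod_eq_emod_of_pos (by norm_num)
    have hdiv : PySem.Int.floordiv n 2 = n / 2 := PySem.Int.floordiv_eq_ediv_of_pos (by norm_num)
    simp only [hmod, hdiv]
    rw [if_neg (show ¬ n ≤ 0 by omega)]
    by_cases hodd : n % 2 = 1
    · rw [if_pos hodd]
      by_cases hhalf : n / 2 ≤ 0
      · rw [if_pos hhalf, pvApply_eq K v hv]
        have h1 : n = 1 := by omega
        subst h1
        norm_num
      · rw [if_neg hhalf, pvApply_eq K v hv, matOf_sq]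
        have hidx : K * n.toNat = 2 * K * ((n / 2).toNat) + K := by
          have hq : n.toNat = 2 * ((n / 2).toNat) + 1 := by omega
          rw [hq]; ring
        rw [hidx, Function.iterate_add_apply]
        exact ih (n / 2) (by omega) (by omega) (2 * K) _ (iter_lt _ _ hv)
    · rw [if_neg hodd]
      have hhalf : ¬ n / 2 ≤ 0 := by omega
      rw [if_neg hhalf, matOf_sq]
      have hidx : K * n.toNat = 2 * K * ((n / 2).toNat) := by
        have hq : n.toNat = 2 * ((n / 2).toNat) := by omega
        rw [hq]; ring
      rw [hidx]
      exact ih (n / 2) (by omega) (by omega) (2 * K) v hv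

lemma A_iter (s n : Int) : compute_secret_hash s n = pvStep^[n.toNat] s := by
  have hb : (fun (s : Int) (_ : Int) =>
      let s1 := PySem.Int.mod (PySem.Int.bxor s (s * 64)) 16777216
      let s2 := PySem.Int.mod (PySem.Int.bxor s1 (PySem.Int.floordiv s1 32)) 16777216
      PySem.Int.mod (PySem.Int.bxor s2 (s2 * 2048)) 16777216) = (fun (s : Int) (_ : Int) => pvStep s) := rfl
  rw [compute_secret_hash, hb, foldl_const_iterate, length_pyRange01]

lemma modM_toNat_lt (x : Int) : (PySem.Int.mod x 16777216).toNat < 2 ^ 24 := by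
  have h1 := PySem.Int.mod_lt (a := x) (b := 16777216) (by norm_num)
  have h2 := PySem.Int.mod_nonneg (a := x) (b := 16777216) (by norm_num)
  have h3 : (2:Nat) ^ 24 = 16777216 := by norm_num
  omega

lemma A_eq_nat (x : Int) (m : Nat) :
    pvStep^[m + 1] x = ((NatStep^[m + 1] (PySem.Int.mod x 16777216).toNat : Nat) : Int) := by
  induction m with
  | zero => simpa using pvStep_eq x
  | succ m ih =>
    rw [Function.iterate_succ_apply' (f := pvStep) (n := m + 1), ih, pvStep_eq]
    rw [mod_cast_M, Int.toNat_natCast,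
      Nat.mod_eq_of_lt (iter_lt _ _ (modM_toNat_lt x))]
    conv_rhs => rw [Function.iterate_succ_apply' NatStep (m + 1)]

-- ===== VERDICT (by name: the statement is the Claim_ definition above) =====
theorem compute_secret_hash_spec : Claim_equal_compute_secret_hash := by
  intro secret iterations _
  unfold Spec_compute_secret_hash
  by_cases hn : iterations ≤ 0
  · rw [compute_secret_hash_alt, if_pos hn, A_iter, show iterations.toNat = 0 by omega]
    rfl
  · rw [compute_secret_hash_alt, if_neg hn, A_iter]
    obtain ⟨m, hm⟩ : ∃ m, iterations.toNat = m + 1 := ⟨iterations.toNat - 1, by omega⟩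
    rw [hm, A_eq_nat]
    have hbase : (List.range 24).map (fun j => pvStep ((2 : Int) ^ j)) = matOf 1 := by
      rw [matOf]
      apply List.map_congr_left
      intro j hj
      have hj' : j < 24 := List.mem_range.mp hj
      have hc : ((2 : Int) ^ j) = ((2 ^ j : Nat) : Int) := by push_cast; ring
      rw [hc, pvStep_eq, mod_cast_M, Int.toNat_natCast,
        Nat.mod_eq_of_lt (Nat.pow_lt_pow_right (by norm_num) hj'),
        Function.iterate_one]
    have hr : PySem.Int.mod secret 16777216
        = (((PySem.Int.mod secret 16777216).toNat : Nat) : Int) :=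
      (Int.toNat_of_nonneg (PySem.Int.mod_nonneg (a := secret) (b := 16777216) (by norm_num))).symm
    rw [hbase, hr, pvPowLoop_eq iterations.toNat iterations (by omega) (le_refl _) 1 _
      (modM_toNat_lt secret)]
    rw [one_mul, hm, Int.toNat_natCast]
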